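-- pv_equiv track=rewrite | github.com/bitcores/adventofcode2019 | d3.py | linedicts
-- ===== SOURCE A (Python) =====
-- def linedicts(mdict):
--     ldict = []
--     spos = [0,0]
--     lpos = spos[:]
--     for move in mdict:
--         npos = lpos[:]
--         direction = move[:1]
--         steps = move[1:]
--
--         if direction == "R":
--             npos[0] = lpos[0] + int(steps)
--         elif direction == "L":
--             npos[0] = lpos[0] - int(steps)
--         elif direction == "U":
--             npos[1] = lpos[1] + int(steps)
--         elif direction == "D":
--             npos[1] = lpos[1] - int(steps)
--
--         ldict.append([lpos, npos])
--         lpos = npos[:]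
--     return ldict
-- ===== SOURCE B (Python) =====
-- def linedicts(mdict):
--     def delta(move):
--         d, s = move[:1], move[1:]
--         if d == "R":
--             return (int(s), 0)
--         if d == "L":
--             return (-int(s), 0)
--         if d == "U":
--             return (0, int(s))
--         if d == "D":
--             return (0, -int(s))
--         return (0, 0)
--
--     deltas = [delta(m) for m in mdict]
--     points = [(sum(dx for dx, _ in deltas[:i]), sum(dy for _, dy in deltas[:i]))
--               for i in range(len(deltas) + 1)]
--     return [[list(p), list(q)] for p, q in zip(points, points[1:])]
-- ===== Notes on version B (the rewrite author's own statement) =====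
-- stated objective: alternative
-- what changed: B keeps no running position at all: it first parses every move into a signed delta vector, then computes each vertex independently as the closed-form prefix sum of the deltas before it, and finally pairs consecutive vertices with zip; A instead threads a mutable current position through one loop that branches and appends a segment per move.
import Mathlib
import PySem

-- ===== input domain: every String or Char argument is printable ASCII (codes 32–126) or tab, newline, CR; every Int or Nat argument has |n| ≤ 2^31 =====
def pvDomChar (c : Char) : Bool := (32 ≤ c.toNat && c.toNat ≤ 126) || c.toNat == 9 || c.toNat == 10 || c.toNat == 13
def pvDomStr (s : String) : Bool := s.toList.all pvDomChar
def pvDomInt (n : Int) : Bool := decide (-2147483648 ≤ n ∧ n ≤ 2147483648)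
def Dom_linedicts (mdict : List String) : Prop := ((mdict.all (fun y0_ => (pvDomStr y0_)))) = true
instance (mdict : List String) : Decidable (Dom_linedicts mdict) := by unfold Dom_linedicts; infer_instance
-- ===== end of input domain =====

-- B keeps no running position: it parses moves into delta vectors, computes every vertex as the
-- closed-form prefix sum of the deltas before it, and zips consecutive vertices; alternative, not faster.

-- ===== PORT A =====
-- A's loop: state = (segments so far, current position); position kept as a pair (Python's 2-lists).
def linedicts (mdict : List String) : List (List (List Int)) :=
  (mdict.foldl (fun (st : List (List (List Int)) × (Int × Int)) move =>
      let lpos := st.2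
      let direction := PySem.List.slice move.toList none (some 1)
      let steps := PySem.List.slice move.toList (some 1) none
      let npos :=
        if direction = ['R'] then (lpos.1 + (PySem.Int.ofChars? steps).getD 0, lpos.2)
        else if direction = ['L'] then (lpos.1 - (PySem.Int.ofChars? steps).getD 0, lpos.2)
        else if direction = ['U'] then (lpos.1, lpos.2 + (PySem.Int.ofChars? steps).getD 0)
        else if direction = ['D'] then (lpos.1, lpos.2 - (PySem.Int.ofChars? steps).getD 0)
        else lpos
      (st.1 ++ [[[lpos.1, lpos.2], [npos.1, npos.2]]], npos))
    ([], (0, 0))).1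

-- ===== PORT B =====
-- Source B's helper delta(move)
def pvDelta (move : String) : Int × Int :=
  let d := PySem.List.slice move.toList none (some 1)
  let s := PySem.List.slice move.toList (some 1) none
  if d = ['R'] then ((PySem.Int.ofChars? s).getD 0, 0)
  else if d = ['L'] then (-(PySem.Int.ofChars? s).getD 0, 0)
  else if d = ['U'] then (0, (PySem.Int.ofChars? s).getD 0)
  else if d = ['D'] then (0, -(PySem.Int.ofChars? s).getD 0)
  else (0, 0)

def linedicts_alt (mdict : List String) : List (List (List Int)) :=
  let deltas := mdict.map pvDelta
  let points := (List.range (deltas.length + 1)).map (fun i =>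
      (((deltas.take i).map Prod.fst).sum, ((deltas.take i).map Prod.snd).sum))
  (points.zip (PySem.List.slice points (some 1) none)).map
    (fun pq => [[pq.1.1, pq.1.2], [pq.2.1, pq.2.2]])

-- ===== PRECONDITION & SPEC =====
-- Pre_ excludes exactly the inputs on which A raises ValueError: a move starting with
-- R/L/U/D whose remainder is not a valid int() literal.
def Pre_linedicts (mdict : List String) : Prop :=
  ∀ move ∈ mdict,
    (move.toList.take 1 = ['R'] ∨ move.toList.take 1 = ['L'] ∨
     move.toList.take 1 = ['U'] ∨ move.toList.take 1 = ['D']) →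
    (PySem.Int.ofChars? (move.toList.drop 1)).isSome = true
instance (mdict : List String) : Decidable (Pre_linedicts mdict) := by
  unfold Pre_linedicts; infer_instance

def pvWitness_linedicts : List String := ["R10", "U5", "X3", "L2", "D7"]

def Spec_linedicts (mdict : List String) (out : List (List (List Int))) : Prop := out = linedicts_alt mdict
instance (mdict : List String) (out : List (List (List Int))) : Decidable (Spec_linedicts mdict out) := by unfold Spec_linedicts; infer_instance

-- ===== CLAIM (what is proved, stated in full; the proofs are below) =====
def Claim_equal_linedicts : Prop := ∀ (mdict : List String), Dom_linedicts mdict → Pre_linedicts mdict → Spec_linedicts mdict (linedicts mdict)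

-- ===== LEMMAS AND PROOFS =====

-- A's per-move position update, extracted
def pvStep (pos : Int × Int) (move : String) : Int × Int :=
  let direction := PySem.List.slice move.toList none (some 1)
  let steps := PySem.List.slice move.toList (some 1) none
  if direction = ['R'] then (pos.1 + (PySem.Int.ofChars? steps).getD 0, pos.2)
  else if direction = ['L'] then (pos.1 - (PySem.Int.ofChars? steps).getD 0, pos.2)
  else if direction = ['U'] then (pos.1, pos.2 + (PySem.Int.ofChars? steps).getD 0)
  else if direction = ['D'] then (pos.1, pos.2 - (PySem.Int.ofChars? steps).getD 0)
  else pos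

-- the segment list A produces from a start position
def pvSegs (pos : Int × Int) : List String → List (List (List Int))
  | [] => []
  | m :: ms =>
      [[pos.1, pos.2], [(pvStep pos m).1, (pvStep pos m).2]] :: pvSegs (pvStep pos m) ms

theorem pvStep_delta (pos : Int × Int) (m : String) :
    pvStep pos m = (pos.1 + (pvDelta m).1, pos.2 + (pvDelta m).2) := by
  unfold pvStep pvDelta
  dsimp only
  split_ifs <;> simp [Prod.ext_iff] <;> ring

theorem linedicts_foldl (ms : List String) (acc : List (List (List Int))) (pos : Int × Int) :
    ((ms.foldl (fun (st : List (List (List Int)) × (Int × Int)) move =>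
      let lpos := st.2
      let direction := PySem.List.slice move.toList none (some 1)
      let steps := PySem.List.slice move.toList (some 1) none
      let npos :=
        if direction = ['R'] then (lpos.1 + (PySem.Int.ofChars? steps).getD 0, lpos.2)
        else if direction = ['L'] then (lpos.1 - (PySem.Int.ofChars? steps).getD 0, lpos.2)
        else if direction = ['U'] then (lpos.1, lpos.2 + (PySem.Int.ofChars? steps).getD 0)
        else if direction = ['D'] then (lpos.1, lpos.2 - (PySem.Int.ofChars? steps).getD 0)
        else lpos
      (st.1 ++ [[[lpos.1, lpos.2], [npos.1, npos.2]]], npos)) (acc, pos))).1 =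
    acc ++ pvSegs pos ms := by
  induction ms generalizing acc pos with
  | nil => simp [pvSegs]
  | cons m ms ih =>
      simp only [List.foldl_cons]
      rw [ih]
      simp [pvSegs, pvStep]

-- zip of a range-indexed list with its own tail = range of consecutive pairs
theorem zip_tail_range {α : Type} (n : Nat) (f : Nat → α) :
    (((List.range (n + 1)).map f).zip (((List.range (n + 1)).map f).tail)) =
    (List.range n).map (fun k => (f k, f (k + 1))) := by
  apply List.ext_getElem
  · simp
  · intro k h1 h2
    simp [List.getElem_zip, List.getElem_tail]

-- A's segments = consecutive pairs of prefix-sum vertices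
theorem segs_eq_prefix (ms : List String) (pos : Int × Int) :
    pvSegs pos ms = (List.range ms.length).map (fun k =>
      [[pos.1 + (((ms.map pvDelta).take k).map Prod.fst).sum,
        pos.2 + (((ms.map pvDelta).take k).map Prod.snd).sum],
       [pos.1 + (((ms.map pvDelta).take (k + 1)).map Prod.fst).sum,
        pos.2 + (((ms.map pvDelta).take (k + 1)).map Prod.snd).sum]]) := by
  induction ms generalizing pos with
  | nil => simp [pvSegs]
  | cons m ms ih =>
      simp only [List.length_cons]
      rw [List.range_succ_eq_map]
      simp only [List.map_cons, List.map_map, pvSegs]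
      congr 1
      · simp [pvStep_delta]
      · rw [ih (pvStep pos m)]
        apply List.map_congr_left
        intro k _
        simp [Function.comp, List.take_succ_cons, pvStep_delta]
        constructor <;> constructor <;> ring

-- ===== VERDICT (by name: the statement is the Claim_ definition above) =====
theorem linedicts_spec : Claim_equal_linedicts := by
  intro mdict _ _
  unfold Spec_linedicts linedicts linedicts_alt
  rw [linedicts_foldl]
  simp only [List.nil_append, PySem.List.slice_from_one, List.length_map]
  rw [zip_tail_range mdict.length
    (fun i => ((((mdict.map pvDelta).take i).map Prod.fst).sum,
               (((mdict.map pvDelta).take i).map Prod.snd).sum))]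
  rw [segs_eq_prefix mdict (0, 0)]
  simp [List.map_map, Function.comp]
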